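-- pv_equiv track=rewrite | github.com/gerbie-goober/A2_CSCA08 | voting_systems.py | voting_range
-- ===== SOURCE A (Python) =====
-- from typing import List
--
-- def voting_range(range_ballots: List[List[int]],
--                  party_order: List[str]) -> List[int]:
--     """Return the total score for each party in range ballots
--     range_ballots, in the order specified in party_order.
--
--     Pre: len of each sublist of range_ballots is len(party_order)
--          the scores in each ballot are specified in the order of party_order
--
--     >>> voting_range([[1, 3, 4, 5], [5, 5, 1, 2], [1, 4, 1, 1]],
--     ...              SAMPLE_ORDER_1)
--     [7, 12, 6, 8]
--     >>> voting_range([[0, 1, 1, 10], [0, 0, 0, 10], [0, 1, 1, 10]],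
--     ...              SAMPLE_ORDER_2)
--     [0, 2, 2, 30]
--     """
--     total_score = []
--     j = 0
--     while j < len(party_order):
--         total_sum = 0
--         for row in range_ballots:
--             total_sum += row[j]
--         total_score.append(total_sum)
--         j += 1
--     return total_score
-- ===== SOURCE B (Python) =====
-- def voting_range(range_ballots, party_order):
--     n = len(party_order)
--
--     def vsum(bs):
--         # divide-and-conquer column sums
--         if not bs:
--             return [0] * n
--         if len(bs) == 1:
--             return [bs[0][j] for j in range(n)]
--         mid = len(bs) // 2
--         return [a + b for a, b in zip(vsum(bs[:mid]), vsum(bs[mid:]))]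
--
--     return vsum(range_ballots)
-- ===== Notes on version B (the rewrite author's own statement) =====
-- stated objective: alternative
-- what changed: Replaces A's per-party column scans (outer while over party indices, inner pass over all ballots for each party) with a divide-and-conquer recursion that splits the ballot list in half and combines the two halves' score vectors by elementwise vector addition.
import Mathlib
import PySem

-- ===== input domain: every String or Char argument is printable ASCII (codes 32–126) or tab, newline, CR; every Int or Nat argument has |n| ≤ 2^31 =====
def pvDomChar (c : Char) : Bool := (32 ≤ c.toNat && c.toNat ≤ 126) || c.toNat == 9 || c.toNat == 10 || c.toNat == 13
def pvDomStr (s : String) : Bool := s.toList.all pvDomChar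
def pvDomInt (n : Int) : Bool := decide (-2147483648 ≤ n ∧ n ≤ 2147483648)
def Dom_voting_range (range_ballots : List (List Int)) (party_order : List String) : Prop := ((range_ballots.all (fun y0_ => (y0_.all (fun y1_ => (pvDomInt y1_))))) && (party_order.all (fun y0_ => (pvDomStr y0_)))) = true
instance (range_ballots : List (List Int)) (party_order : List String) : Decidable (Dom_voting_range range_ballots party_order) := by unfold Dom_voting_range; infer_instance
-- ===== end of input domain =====

-- B is a divide-and-conquer re-implementation (halve the ballot list, add score vectors);
-- equivalence is proved on inputs where every ballot row has at least len(party_order) entries.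

-- ===== PORT A =====
-- A: while j < len(party_order): sum row[j] over all ballots, append.
def voting_range (range_ballots : List (List Int)) (party_order : List String) : List Int :=
  (List.range party_order.length).map
    (fun j => range_ballots.foldl (fun s row => s + row.getD j 0) 0)

-- ===== PORT B =====
-- elementwise vector addition: [a + b for a, b in zip(xs, ys)]
def pvZipAdd (xs ys : List Int) : List Int :=
  (xs.zip ys).map (fun p => p.1 + p.2)

-- vsum: divide-and-conquer column sums over the ballot list
def pvVSum (n : Nat) (bs : List (List Int)) : List Int :=
  if h0 : bs = [] then List.replicate n 0
  else if h1 : bs.length = 1 then (List.range n).map (fun j => (bs.headD []).getD j 0)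
  else pvZipAdd (pvVSum n (bs.take (bs.length / 2))) (pvVSum n (bs.drop (bs.length / 2)))
termination_by bs.length
decreasing_by
  · have hp : 0 < bs.length := List.length_pos_of_ne_nil h0
    simp only [List.length_take]; omega
  · have hp : 0 < bs.length := List.length_pos_of_ne_nil h0
    simp only [List.length_drop]; omega

def voting_range_alt (range_ballots : List (List Int)) (party_order : List String) : List Int :=
  pvVSum party_order.length range_ballots

-- ===== PRECONDITION & SPEC =====
-- Pre_ excludes inputs where some ballot row is shorter than party_order: there the Python A raises IndexError on row[j].
def Pre_voting_range (range_ballots : List (List Int)) (party_order : List String) : Prop :=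
  ∀ row ∈ range_ballots, party_order.length ≤ row.length
instance (range_ballots : List (List Int)) (party_order : List String) : Decidable (Pre_voting_range range_ballots party_order) := by unfold Pre_voting_range; infer_instance
def pvWitness_voting_range : List (List Int) × List String := ([[1, 3, 4], [5, 5, 1]], ["a", "b", "c"])

def Spec_voting_range (range_ballots : List (List Int)) (party_order : List String) (out : List Int) : Prop := out = voting_range_alt range_ballots party_order
instance (range_ballots : List (List Int)) (party_order : List String) (out : List Int) : Decidable (Spec_voting_range range_ballots party_order out) := by unfold Spec_voting_range; infer_instance

-- ===== CLAIM (what is proved, stated in full; the proofs are below) =====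
def Claim_equal_voting_range : Prop := ∀ (range_ballots : List (List Int)) (party_order : List String), Dom_voting_range range_ballots party_order → Pre_voting_range range_ballots party_order → Spec_voting_range range_ballots party_order (voting_range range_ballots party_order)

-- ===== LEMMAS AND PROOFS =====

-- A's column sum as a function of the ballot list
def pvColSums (n : Nat) (bs : List (List Int)) : List Int :=
  (List.range n).map (fun j => bs.foldl (fun s row => s + row.getD j 0) 0)

lemma colsum_append (j : Nat) (t d : List (List Int)) :
    (t ++ d).foldl (fun s row => s + row.getD j 0) 0 =
      t.foldl (fun s row => s + row.getD j 0) 0 +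
      d.foldl (fun s row => s + row.getD j 0) 0 := by
  rw [List.foldl_append,
      PySem.List.foldl_add d (fun r => r.getD j 0) (t.foldl (fun s row => s + row.getD j 0) 0),
      PySem.List.foldl_add d (fun r => r.getD j 0) 0]
  ring

lemma pvZipAdd_maps {n : Nat} (f g : Nat → Int) :
    pvZipAdd ((List.range n).map f) ((List.range n).map g) =
      (List.range n).map (fun j => f j + g j) := by
  simp [pvZipAdd, List.zip_map']

lemma pvVSum_eq (n : Nat) (bs : List (List Int)) : pvVSum n bs = pvColSums n bs := by
  induction bs using pvVSum.induct with
  | case1 =>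
      simp [pvVSum, pvColSums]
  | case2 bs h h1 =>
      match bs, h1 with
      | [row], _ =>
          simp [pvVSum, pvColSums]
  | case3 bs h h1 ih1 ih2 =>
      rw [pvVSum]
      simp only [dif_neg h, dif_neg h1]
      rw [ih1, ih2]
      unfold pvColSums
      rw [pvZipAdd_maps]
      apply List.map_congr_left
      intro j _
      rw [← colsum_append, List.take_append_drop]

-- ===== VERDICT (by name: the statement is the Claim_ definition above) =====
theorem voting_range_spec : Claim_equal_voting_range := by
  intro rb po _ _
  unfold Spec_voting_range voting_range voting_range_alt
  rw [pvVSum_eq]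
  rfl
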